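-- pv_equiv track=rewrite | github.com/Naruto-uzumaki-10/Cloner_Sadhin | SADHIN.py | estimate_creation_year
-- ===== SOURCE A (Python) =====
-- def estimate_creation_year(uid):
--     """Estimate account creation year based on UID pattern"""
--     if not uid or len(uid) < 7:
--         return "Unknown"
--
--     # This is just for demonstration - real estimation is more complex
--     year_ranges = {
--         '100000': '2009',
--         '100001': '2010',
--         '100002': '2011',
--         '100003': '2012',
--         '100004': '2013',
--         '100005': '2014',
--         '100006': '2015',
--         '100007': '2016',
--         '100008': '2017',
--         '100009': '2018'
--     }
--
--     for prefix, year in year_ranges.items():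
--         if uid.startswith(prefix):
--             return year
--     return "Unknown"
-- ===== SOURCE B (Python) =====
-- def estimate_creation_year(uid):
--     """Estimate account creation year based on UID pattern"""
--     if not uid or len(uid) < 7:
--         return "Unknown"
--     # the table in A maps '10000'+d to str(2009+d) for each digit d
--     if uid[:5] == '10000' and uid[5] in '0123456789':
--         return str(2009 + int(uid[5]))
--     return "Unknown"
-- ===== Notes on version B (the rewrite author's own statement) =====
-- stated objective: simpler
-- what changed: Replaced the 10-entry prefix dictionary and its startswith loop by a closed-form check: the fixed five-character prefix followed by a digit d yields the year 2009+d directly.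
import Mathlib
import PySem

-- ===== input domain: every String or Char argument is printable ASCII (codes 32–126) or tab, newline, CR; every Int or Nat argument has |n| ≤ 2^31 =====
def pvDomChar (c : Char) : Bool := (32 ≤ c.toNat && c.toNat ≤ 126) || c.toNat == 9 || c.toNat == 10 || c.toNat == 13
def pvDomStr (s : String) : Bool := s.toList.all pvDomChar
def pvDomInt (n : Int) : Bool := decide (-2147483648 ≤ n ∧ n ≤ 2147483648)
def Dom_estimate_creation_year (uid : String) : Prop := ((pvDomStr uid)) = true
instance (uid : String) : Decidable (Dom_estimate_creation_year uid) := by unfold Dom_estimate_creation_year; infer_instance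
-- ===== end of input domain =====

-- B replaces A's 10-entry prefix table and startswith loop with a closed-form check (simpler).


-- ===== PORT A =====
-- the year_ranges dict in insertion order
def pvYearRanges : List (List Char × String) :=
  [(['1','0','0','0','0','0'], "2009"),
   (['1','0','0','0','0','1'], "2010"),
   (['1','0','0','0','0','2'], "2011"),
   (['1','0','0','0','0','3'], "2012"),
   (['1','0','0','0','0','4'], "2013"),
   (['1','0','0','0','0','5'], "2014"),
   (['1','0','0','0','0','6'], "2015"),
   (['1','0','0','0','0','7'], "2016"),
   (['1','0','0','0','0','8'], "2017"),
   (['1','0','0','0','0','9'], "2018")]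

-- 'for prefix, year in year_ranges.items(): if uid.startswith(prefix): return year'
def pvEcyLoop (uid : List Char) : List (List Char × String) → String
  | [] => "Unknown"
  | (p, y) :: rest => if PySem.Chars.startswith uid p then y else pvEcyLoop uid rest

def estimate_creation_year (uid : String) : String :=
  if uid.toList.length = 0 ∨ uid.toList.length < 7 then "Unknown"
  else pvEcyLoop uid.toList pvYearRanges

-- ===== PORT B =====
def estimate_creation_year_alt (uid : String) : String :=
  let cs := uid.toList
  if cs.length = 0 ∨ cs.length < 7 then "Unknown"
  else
    match cs[5]? with
    | none => "Unknown"  -- unreachable: length ≥ 7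
    | some c =>
      if cs.take 5 = ['1','0','0','0','0'] ∧ PySem.Chars.isIn [c] "0123456789".toList
      then PySem.Int.toStr (2009 + ((c.toNat : Int) - 48))  -- str(2009 + int(uid[5])): exact, c is a decimal digit here
      else "Unknown"

-- ===== PRECONDITION & SPEC =====
def Spec_estimate_creation_year (uid : String) (out : String) : Prop := out = estimate_creation_year_alt uid
instance (uid : String) (out : String) : Decidable (Spec_estimate_creation_year uid out) := by unfold Spec_estimate_creation_year; infer_instance

-- ===== CLAIM (what is proved, stated in full; the proofs are below) =====
def Claim_equal_estimate_creation_year : Prop := ∀ (uid : String), Dom_estimate_creation_year uid → Spec_estimate_creation_year uid (estimate_creation_year uid)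

-- ===== LEMMAS AND PROOFS =====

theorem ecy_eq (uid : String) : estimate_creation_year uid = estimate_creation_year_alt uid := by
  unfold estimate_creation_year estimate_creation_year_alt
  cases h : uid.toList with
  | nil => simp
  | cons a t0 =>
    match t0 with
    | [] => simp
    | [b] => simp
    | [b,c] => simp
    | [b,c,d] => simp
    | [b,c,d,e] => simp
    | [b,c,d,e,f] => simp
    | b :: c :: d :: e :: f :: g :: rest =>
      simp only [List.length_cons]
      rw [if_neg (by omega), if_neg (by omega)]
      simp only [pvYearRanges, pvEcyLoop, PySem.Chars.startswith, List.getElem?_cons_succ,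
        List.getElem?_cons_zero]
      by_cases h1 : a = '1' ∧ b = '0' ∧ c = '0' ∧ d = '0' ∧ e = '0'
      · obtain ⟨rfl, rfl, rfl, rfl, rfl⟩ := h1
        by_cases h0 : f = '0'; · subst h0; simp; decide
        by_cases hx1 : f = '1'; · subst hx1; simp; decide
        by_cases hx2 : f = '2'; · subst hx2; simp; decide
        by_cases hx3 : f = '3'; · subst hx3; simp; decide
        by_cases hx4 : f = '4'; · subst hx4; simp; decide
        by_cases hx5 : f = '5'; · subst hx5; simp; decide
        by_cases hx6 : f = '6'; · subst hx6; simp; decide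
        by_cases hx7 : f = '7'; · subst hx7; simp; decide
        by_cases hx8 : f = '8'; · subst hx8; simp; decide
        by_cases hx9 : f = '9'; · subst hx9; simp; decide
        have hnotin : PySem.Chars.isIn [f] ['0','1','2','3','4','5','6','7','8','9'] = false := by
          rw [PySem.Chars.isIn_eq_false_iff, List.singleton_infix_iff]
          intro hmem
          simp only [List.mem_cons, List.not_mem_nil, or_false] at hmem
          rcases hmem with h'|h'|h'|h'|h'|h'|h'|h'|h'|h' <;> simp_all
        simp [List.isPrefixOf, hnotin, Ne.symm h0, Ne.symm hx1, Ne.symm hx2, Ne.symm hx3, Ne.symm hx4, Ne.symm hx5, Ne.symm hx6, Ne.symm hx7, Ne.symm hx8, Ne.symm hx9]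
      · have hd : a ≠ '1' ∨ b ≠ '0' ∨ c ≠ '0' ∨ d ≠ '0' ∨ e ≠ '0' := by tauto
        rcases hd with h' | h' | h' | h' | h' <;>
          simp [List.isPrefixOf, h', Ne.symm h']

-- ===== VERDICT (by name: the statement is the Claim_ definition above) =====
theorem estimate_creation_year_spec : Claim_equal_estimate_creation_year := by
  intro uid _
  exact ecy_eq uid
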